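-- pv_equiv track=rewrite | github.com/paw309/polyominoes | polyomino_v4.py | shapes_for_class
-- ===== SOURCE A (Python) =====
-- SAMPLE_POLYOMINOES = {
--     "tri-I": [(0, 0), (1, 0), (2, 0)],
--     "tri-L": [(0, 0), (0, 1), (1, 1)],
--     "tet-I": [(0, 0), (0, 1), (0, 2), (0, 3)],
--     "tet-L": [(0, 0), (0, 1), (0, 2), (1, 2)],
--     "tet-O": [(0, 0), (1, 0), (0, 1), (1, 1)],
--     "tet-S": [(1, 0), (2, 0), (0, 1), (1, 1)],
--     "tet-T": [(0, 1), (1, 1), (2, 1), (1, 0)],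
--     "pen-F": [(0,1), (1,0), (1,1), (1,2), (2,2)],
--     "pen-I": [(0, 0), (0, 1), (0, 2), (0, 3), (0, 4)],
--     "pen-L": [(0, 0), (0, 1), (0, 2), (0, 3), (1, 0)],
--     "pen-N": [(0, 0), (0, 1), (1, 1), (1, 2), (1, 3)],
--     "pen-P": [(0, 0), (1, 0), (0, 1), (1, 1), (0, 2)],
--     "pen-T": [(0,2), (1, 2), (2, 2), (1, 0), (1, 1)],
--     "pen-U": [(0, 0), (0, 1), (1, 0), (2, 0), (2, 1)],
--     "pen-V": [(0, 0), (0, 1), (0, 2), (1, 0), (2, 0)],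
--     "pen-W": [(0, 1), (0, 2), (1, 0), (1, 1), (2, 0)],
--     "pen-X": [(0, 1), (1, 0), (1, 1), (1, 2), (2, 1)],
--     "pen-Y": [(0, 2), (1, 0), (1, 1), (1, 2), (1, 3)],
--     "pen-Z": [(0,2), (1,0), (1,1), (1,2), (2,0)],
--     "hex-01": [(0, 0), (0, 1), (0, 2), (0, 3), (0, 4), (0, 5)],
--     "hex-02": [(0, 0), (0, 1), (1, 0), (1, 1), (2, 0), (2, 1)],
--     "hex-03": [(0, 0), (1, 0), (2, 0), (3, 0), (4, 0), (4, 1)],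
--     "hex-04": [(0, 0), (1, 0), (2, 0), (2, 1), (3, 0), (4, 0)],
--     "hex-05": [(0, 1), (1, 1), (2, 1), (3, 0), (3, 1), (4, 0)],
--     "hex-06": [(0, 1), (1, 1), (2, 0), (2, 1), (3, 0), (4, 0)],
--     "hex-07": [(0, 0), (1, 0), (2, 0), (3, 0), (3, 1), (4, 0)],
--     "hex-08": [(0, 0), (0, 1), (1, 0), (1, 1), (2, 1), (3, 1)],
--     "hex-09": [(0, 0), (0, 1), (1, 0), (2, 0), (3, 0), (3, 1)],
--     "hex-10": [(0, 1), (1, 0), (1, 1), (2, 0), (3, 0), (3, 1)],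
--     "hex-11": [(0, 1), (1, 0), (1, 1), (2, 0), (2, 1), (3, 0)],
--     "hex-12": [(0, 0), (1, 0), (1, 1), (2, 0), (2, 1), (3, 0)],
--     "hex-13": [(0, 0), (0, 1), (1, 0), (2, 0), (2, 1), (3, 0)],
--     "hex-14": [(0, 0), (1, 0), (2, 0), (2, 1), (2, 2), (3, 1)],
--     "hex-15": [(0, 0), (1, 0), (1, 1), (1, 2), (2, 1), (2, 2)],
--     "hex-16": [(0, 1), (0, 2), (1, 0), (1, 1), (2, 1), (2, 2)],
--     "hex-17": [(0, 0), (0, 1), (1, 0), (2, 0), (2, 1), (2, 2)],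
--     "hex-18": [(0, 1), (0, 2), (1, 0), (1, 1), (1, 2), (2, 2)],
--     "hex-19": [(0, 1), (1, 0), (1, 1), (1, 2), (2, 0), (2, 1)],
--     "hex-20": [(0, 0), (0, 1), (0, 2), (1, 1), (2, 1), (2, 2)],
--     "hex-21": [(0, 0), (1, 0), (1, 1), (2, 0), (2, 1), (2, 2)],
--     "hex-22": [(0, 0), (1, 0), (1, 1), (2, 1), (2, 2), (3, 1)],
--     "hex-23": [(0, 1), (1, 1), (1, 2), (2, 0), (2, 1), (3, 1)],
--     "hex-24": [(0, 1), (0, 2), (1, 1), (2, 1), (3, 0), (3, 1)],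
--     "hex-25": [(0, 1), (1, 1), (2, 0), (2, 1), (2, 2), (3, 2)],
--     "hex-26": [(0, 2), (1, 2), (2, 1), (2, 2), (3, 0), (3, 1)],
--     "hex-27": [(0, 2), (1, 1), (1, 2), (2, 0), (2, 1), (3, 0)],
--     "hex-28": [(0, 2), (1, 0), (1, 1), (1, 2), (2, 0), (3, 0)],
--     "hex-29": [(0, 2), (1, 2), (2, 0), (2, 1), (2, 2), (3, 2)],
--     "hex-30": [(0, 1), (0, 2), (1, 1), (2, 0), (2, 1), (3, 0)],
--     "hex-31": [(0, 1), (0, 2), (1, 1), (2, 0), (2, 1), (3, 1)],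
--     "hex-32": [(0, 1), (1, 1), (2, 0), (2, 1), (2, 2), (3, 1)],
--     "hex-33": [(0, 1), (1, 1), (2, 0), (2, 1), (3, 1), (3, 2)],
--     "hex-34": [(0, 0), (0, 1), (0, 2), (1, 0), (2, 0), (3, 0)],
--     "hex-35": [(0, 1), (1, 1), (2, 1), (3, 0), (3, 1), (3, 2)],
-- }
--
-- def shapes_for_class(choice_token):
--     token = str(choice_token).lower()
--     if token == "3":
--         prefix = "tri"
--     elif token == "4":
--         prefix = "tet"
--     elif token == "5":
--         prefix = "pen"
--     elif token == "6":
--         prefix = "hex"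
--     else:
--         prefix = None
--     if prefix:
--         return [(name, SAMPLE_POLYOMINOES[name]) for name in SAMPLE_POLYOMINOES if name.startswith(prefix)]
--     else:
--         return [(name, SAMPLE_POLYOMINOES[name]) for name in SAMPLE_POLYOMINOES]
-- ===== SOURCE B (Python) =====
-- # B: the shape catalogue is a flat text table parsed once at import into a list and
-- # per-size-prefix buckets; a call is a token->prefix lookup plus one dict lookup
-- # (no per-call startswith scan over the dict).
-- _TABLE = [
--     "tri-I 0,0 1,0 2,0",
--     "tri-L 0,0 0,1 1,1",
--     "tet-I 0,0 0,1 0,2 0,3",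
--     "tet-L 0,0 0,1 0,2 1,2",
--     "tet-O 0,0 1,0 0,1 1,1",
--     "tet-S 1,0 2,0 0,1 1,1",
--     "tet-T 0,1 1,1 2,1 1,0",
--     "pen-F 0,1 1,0 1,1 1,2 2,2",
--     "pen-I 0,0 0,1 0,2 0,3 0,4",
--     "pen-L 0,0 0,1 0,2 0,3 1,0",
--     "pen-N 0,0 0,1 1,1 1,2 1,3",
--     "pen-P 0,0 1,0 0,1 1,1 0,2",
--     "pen-T 0,2 1,2 2,2 1,0 1,1",
--     "pen-U 0,0 0,1 1,0 2,0 2,1",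
--     "pen-V 0,0 0,1 0,2 1,0 2,0",
--     "pen-W 0,1 0,2 1,0 1,1 2,0",
--     "pen-X 0,1 1,0 1,1 1,2 2,1",
--     "pen-Y 0,2 1,0 1,1 1,2 1,3",
--     "pen-Z 0,2 1,0 1,1 1,2 2,0",
--     "hex-01 0,0 0,1 0,2 0,3 0,4 0,5",
--     "hex-02 0,0 0,1 1,0 1,1 2,0 2,1",
--     "hex-03 0,0 1,0 2,0 3,0 4,0 4,1",
--     "hex-04 0,0 1,0 2,0 2,1 3,0 4,0",
--     "hex-05 0,1 1,1 2,1 3,0 3,1 4,0",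
--     "hex-06 0,1 1,1 2,0 2,1 3,0 4,0",
--     "hex-07 0,0 1,0 2,0 3,0 3,1 4,0",
--     "hex-08 0,0 0,1 1,0 1,1 2,1 3,1",
--     "hex-09 0,0 0,1 1,0 2,0 3,0 3,1",
--     "hex-10 0,1 1,0 1,1 2,0 3,0 3,1",
--     "hex-11 0,1 1,0 1,1 2,0 2,1 3,0",
--     "hex-12 0,0 1,0 1,1 2,0 2,1 3,0",
--     "hex-13 0,0 0,1 1,0 2,0 2,1 3,0",
--     "hex-14 0,0 1,0 2,0 2,1 2,2 3,1",
--     "hex-15 0,0 1,0 1,1 1,2 2,1 2,2",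
--     "hex-16 0,1 0,2 1,0 1,1 2,1 2,2",
--     "hex-17 0,0 0,1 1,0 2,0 2,1 2,2",
--     "hex-18 0,1 0,2 1,0 1,1 1,2 2,2",
--     "hex-19 0,1 1,0 1,1 1,2 2,0 2,1",
--     "hex-20 0,0 0,1 0,2 1,1 2,1 2,2",
--     "hex-21 0,0 1,0 1,1 2,0 2,1 2,2",
--     "hex-22 0,0 1,0 1,1 2,1 2,2 3,1",
--     "hex-23 0,1 1,1 1,2 2,0 2,1 3,1",
--     "hex-24 0,1 0,2 1,1 2,1 3,0 3,1",
--     "hex-25 0,1 1,1 2,0 2,1 2,2 3,2",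
--     "hex-26 0,2 1,2 2,1 2,2 3,0 3,1",
--     "hex-27 0,2 1,1 1,2 2,0 2,1 3,0",
--     "hex-28 0,2 1,0 1,1 1,2 2,0 3,0",
--     "hex-29 0,2 1,2 2,0 2,1 2,2 3,2",
--     "hex-30 0,1 0,2 1,1 2,0 2,1 3,0",
--     "hex-31 0,1 0,2 1,1 2,0 2,1 3,1",
--     "hex-32 0,1 1,1 2,0 2,1 2,2 3,1",
--     "hex-33 0,1 1,1 2,0 2,1 3,1 3,2",
--     "hex-34 0,0 0,1 0,2 1,0 2,0 3,0",
--     "hex-35 0,1 1,1 2,1 3,0 3,1 3,2",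
-- ]
--
-- def _parse_line(line):
--     parts = line.split()
--     return (parts[0], [(int(p.split(",")[0]), int(p.split(",")[1])) for p in parts[1:]])
--
-- _ALL = [_parse_line(_line) for _line in _TABLE]
--
-- _GROUPS = {}
-- for _pair in _ALL:
--     _GROUPS.setdefault(_pair[0][:3], []).append(_pair)
--
-- _TOKEN_TO_PREFIX = {"3": "tri", "4": "tet", "5": "pen", "6": "hex"}
--
-- def shapes_for_class(choice_token):
--     token = str(choice_token).lower()
--     prefix = _TOKEN_TO_PREFIX.get(token)
--     if prefix is None:
--         return list(_ALL)
--     return _GROUPS.get(prefix, [])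
-- ===== Notes on version B (the rewrite author's own statement) =====
-- stated objective: alternative
-- what changed: B stores the catalogue as a flat text table parsed once at import into per-prefix buckets plus a full list, so a call is a token->prefix lookup followed by one dict lookup, instead of A's per-call startswith filtering scan over the dict.
import Mathlib
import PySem

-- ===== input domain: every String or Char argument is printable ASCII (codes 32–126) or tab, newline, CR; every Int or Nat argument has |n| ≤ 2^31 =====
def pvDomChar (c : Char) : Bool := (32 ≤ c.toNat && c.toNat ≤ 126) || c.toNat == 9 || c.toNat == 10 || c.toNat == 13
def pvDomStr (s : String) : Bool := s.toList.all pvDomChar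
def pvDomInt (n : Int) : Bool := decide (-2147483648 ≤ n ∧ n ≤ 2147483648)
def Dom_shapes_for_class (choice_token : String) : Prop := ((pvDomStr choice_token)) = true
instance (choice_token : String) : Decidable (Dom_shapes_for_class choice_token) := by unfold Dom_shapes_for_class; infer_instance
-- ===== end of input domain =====

-- B keeps the catalogue as a flat text table parsed once into per-prefix buckets, so a call is one
-- dict lookup instead of A's per-call startswith scan over the dict (objective: alternative).
-- ===== PORT A =====
-- SAMPLE_POLYOMINOES as an insertion-ordered dict (association list).
def pvSAMPLE : PySem.Dict String (List (Int × Int)) := PySem.Dict.mk [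
  ("tri-I", [(0, 0), (1, 0), (2, 0)]),
  ("tri-L", [(0, 0), (0, 1), (1, 1)]),
  ("tet-I", [(0, 0), (0, 1), (0, 2), (0, 3)]),
  ("tet-L", [(0, 0), (0, 1), (0, 2), (1, 2)]),
  ("tet-O", [(0, 0), (1, 0), (0, 1), (1, 1)]),
  ("tet-S", [(1, 0), (2, 0), (0, 1), (1, 1)]),
  ("tet-T", [(0, 1), (1, 1), (2, 1), (1, 0)]),
  ("pen-F", [(0, 1), (1, 0), (1, 1), (1, 2), (2, 2)]),
  ("pen-I", [(0, 0), (0, 1), (0, 2), (0, 3), (0, 4)]),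
  ("pen-L", [(0, 0), (0, 1), (0, 2), (0, 3), (1, 0)]),
  ("pen-N", [(0, 0), (0, 1), (1, 1), (1, 2), (1, 3)]),
  ("pen-P", [(0, 0), (1, 0), (0, 1), (1, 1), (0, 2)]),
  ("pen-T", [(0, 2), (1, 2), (2, 2), (1, 0), (1, 1)]),
  ("pen-U", [(0, 0), (0, 1), (1, 0), (2, 0), (2, 1)]),
  ("pen-V", [(0, 0), (0, 1), (0, 2), (1, 0), (2, 0)]),
  ("pen-W", [(0, 1), (0, 2), (1, 0), (1, 1), (2, 0)]),
  ("pen-X", [(0, 1), (1, 0), (1, 1), (1, 2), (2, 1)]),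
  ("pen-Y", [(0, 2), (1, 0), (1, 1), (1, 2), (1, 3)]),
  ("pen-Z", [(0, 2), (1, 0), (1, 1), (1, 2), (2, 0)]),
  ("hex-01", [(0, 0), (0, 1), (0, 2), (0, 3), (0, 4), (0, 5)]),
  ("hex-02", [(0, 0), (0, 1), (1, 0), (1, 1), (2, 0), (2, 1)]),
  ("hex-03", [(0, 0), (1, 0), (2, 0), (3, 0), (4, 0), (4, 1)]),
  ("hex-04", [(0, 0), (1, 0), (2, 0), (2, 1), (3, 0), (4, 0)]),
  ("hex-05", [(0, 1), (1, 1), (2, 1), (3, 0), (3, 1), (4, 0)]),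
  ("hex-06", [(0, 1), (1, 1), (2, 0), (2, 1), (3, 0), (4, 0)]),
  ("hex-07", [(0, 0), (1, 0), (2, 0), (3, 0), (3, 1), (4, 0)]),
  ("hex-08", [(0, 0), (0, 1), (1, 0), (1, 1), (2, 1), (3, 1)]),
  ("hex-09", [(0, 0), (0, 1), (1, 0), (2, 0), (3, 0), (3, 1)]),
  ("hex-10", [(0, 1), (1, 0), (1, 1), (2, 0), (3, 0), (3, 1)]),
  ("hex-11", [(0, 1), (1, 0), (1, 1), (2, 0), (2, 1), (3, 0)]),
  ("hex-12", [(0, 0), (1, 0), (1, 1), (2, 0), (2, 1), (3, 0)]),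
  ("hex-13", [(0, 0), (0, 1), (1, 0), (2, 0), (2, 1), (3, 0)]),
  ("hex-14", [(0, 0), (1, 0), (2, 0), (2, 1), (2, 2), (3, 1)]),
  ("hex-15", [(0, 0), (1, 0), (1, 1), (1, 2), (2, 1), (2, 2)]),
  ("hex-16", [(0, 1), (0, 2), (1, 0), (1, 1), (2, 1), (2, 2)]),
  ("hex-17", [(0, 0), (0, 1), (1, 0), (2, 0), (2, 1), (2, 2)]),
  ("hex-18", [(0, 1), (0, 2), (1, 0), (1, 1), (1, 2), (2, 2)]),
  ("hex-19", [(0, 1), (1, 0), (1, 1), (1, 2), (2, 0), (2, 1)]),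
  ("hex-20", [(0, 0), (0, 1), (0, 2), (1, 1), (2, 1), (2, 2)]),
  ("hex-21", [(0, 0), (1, 0), (1, 1), (2, 0), (2, 1), (2, 2)]),
  ("hex-22", [(0, 0), (1, 0), (1, 1), (2, 1), (2, 2), (3, 1)]),
  ("hex-23", [(0, 1), (1, 1), (1, 2), (2, 0), (2, 1), (3, 1)]),
  ("hex-24", [(0, 1), (0, 2), (1, 1), (2, 1), (3, 0), (3, 1)]),
  ("hex-25", [(0, 1), (1, 1), (2, 0), (2, 1), (2, 2), (3, 2)]),
  ("hex-26", [(0, 2), (1, 2), (2, 1), (2, 2), (3, 0), (3, 1)]),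
  ("hex-27", [(0, 2), (1, 1), (1, 2), (2, 0), (2, 1), (3, 0)]),
  ("hex-28", [(0, 2), (1, 0), (1, 1), (1, 2), (2, 0), (3, 0)]),
  ("hex-29", [(0, 2), (1, 2), (2, 0), (2, 1), (2, 2), (3, 2)]),
  ("hex-30", [(0, 1), (0, 2), (1, 1), (2, 0), (2, 1), (3, 0)]),
  ("hex-31", [(0, 1), (0, 2), (1, 1), (2, 0), (2, 1), (3, 1)]),
  ("hex-32", [(0, 1), (1, 1), (2, 0), (2, 1), (2, 2), (3, 1)]),
  ("hex-33", [(0, 1), (1, 1), (2, 0), (2, 1), (3, 1), (3, 2)]),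
  ("hex-34", [(0, 0), (0, 1), (0, 2), (1, 0), (2, 0), (3, 0)]),
  ("hex-35", [(0, 1), (1, 1), (2, 1), (3, 0), (3, 1), (3, 2)])
]

def shapes_for_class (choice_token : String) : List (String × (List (Int × Int))) :=
  let token := PySem.Str.lower choice_token
  let pfx : Option String :=
    if token = "3" then some "tri"
    else if token = "4" then some "tet"
    else if token = "5" then some "pen"
    else if token = "6" then some "hex"
    else none
  match pfx with
  | some p =>
      -- [(name, SAMPLE_POLYOMINOES[name]) for name in SAMPLE_POLYOMINOES if name.startswith(p)]
      ((pvSAMPLE.keys).filter (fun name => PySem.Str.startswith name p)).map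
        (fun name => (name, pvSAMPLE.getD name []))
  | none =>
      ((pvSAMPLE.keys).map (fun name => (name, pvSAMPLE.getD name [])))

-- ===== PORT B =====
-- _TABLE: the same catalogue as a list of text lines, "name x,y x,y …".
def pvTABLE : List String := [
  "tri-I 0,0 1,0 2,0",
  "tri-L 0,0 0,1 1,1",
  "tet-I 0,0 0,1 0,2 0,3",
  "tet-L 0,0 0,1 0,2 1,2",
  "tet-O 0,0 1,0 0,1 1,1",
  "tet-S 1,0 2,0 0,1 1,1",
  "tet-T 0,1 1,1 2,1 1,0",
  "pen-F 0,1 1,0 1,1 1,2 2,2",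
  "pen-I 0,0 0,1 0,2 0,3 0,4",
  "pen-L 0,0 0,1 0,2 0,3 1,0",
  "pen-N 0,0 0,1 1,1 1,2 1,3",
  "pen-P 0,0 1,0 0,1 1,1 0,2",
  "pen-T 0,2 1,2 2,2 1,0 1,1",
  "pen-U 0,0 0,1 1,0 2,0 2,1",
  "pen-V 0,0 0,1 0,2 1,0 2,0",
  "pen-W 0,1 0,2 1,0 1,1 2,0",
  "pen-X 0,1 1,0 1,1 1,2 2,1",
  "pen-Y 0,2 1,0 1,1 1,2 1,3",
  "pen-Z 0,2 1,0 1,1 1,2 2,0",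
  "hex-01 0,0 0,1 0,2 0,3 0,4 0,5",
  "hex-02 0,0 0,1 1,0 1,1 2,0 2,1",
  "hex-03 0,0 1,0 2,0 3,0 4,0 4,1",
  "hex-04 0,0 1,0 2,0 2,1 3,0 4,0",
  "hex-05 0,1 1,1 2,1 3,0 3,1 4,0",
  "hex-06 0,1 1,1 2,0 2,1 3,0 4,0",
  "hex-07 0,0 1,0 2,0 3,0 3,1 4,0",
  "hex-08 0,0 0,1 1,0 1,1 2,1 3,1",
  "hex-09 0,0 0,1 1,0 2,0 3,0 3,1",
  "hex-10 0,1 1,0 1,1 2,0 3,0 3,1",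
  "hex-11 0,1 1,0 1,1 2,0 2,1 3,0",
  "hex-12 0,0 1,0 1,1 2,0 2,1 3,0",
  "hex-13 0,0 0,1 1,0 2,0 2,1 3,0",
  "hex-14 0,0 1,0 2,0 2,1 2,2 3,1",
  "hex-15 0,0 1,0 1,1 1,2 2,1 2,2",
  "hex-16 0,1 0,2 1,0 1,1 2,1 2,2",
  "hex-17 0,0 0,1 1,0 2,0 2,1 2,2",
  "hex-18 0,1 0,2 1,0 1,1 1,2 2,2",
  "hex-19 0,1 1,0 1,1 1,2 2,0 2,1",
  "hex-20 0,0 0,1 0,2 1,1 2,1 2,2",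
  "hex-21 0,0 1,0 1,1 2,0 2,1 2,2",
  "hex-22 0,0 1,0 1,1 2,1 2,2 3,1",
  "hex-23 0,1 1,1 1,2 2,0 2,1 3,1",
  "hex-24 0,1 0,2 1,1 2,1 3,0 3,1",
  "hex-25 0,1 1,1 2,0 2,1 2,2 3,2",
  "hex-26 0,2 1,2 2,1 2,2 3,0 3,1",
  "hex-27 0,2 1,1 1,2 2,0 2,1 3,0",
  "hex-28 0,2 1,0 1,1 1,2 2,0 3,0",
  "hex-29 0,2 1,2 2,0 2,1 2,2 3,2",
  "hex-30 0,1 0,2 1,1 2,0 2,1 3,0",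
  "hex-31 0,1 0,2 1,1 2,0 2,1 3,1",
  "hex-32 0,1 1,1 2,0 2,1 2,2 3,1",
  "hex-33 0,1 1,1 2,0 2,1 3,1 3,2",
  "hex-34 0,0 0,1 0,2 1,0 2,0 3,0",
  "hex-35 0,1 1,1 2,1 3,0 3,1 3,2"
]

-- (parts[0], [(int(p.split(",")[0]), int(p.split(",")[1])) for p in parts[1:]]).  The .getD
-- defaults are unreachable: pvTABLE is a closed literal on which every pyGet? and ofStr? succeeds
-- (ported exactly up to those defaults).
def pvParsePair (p : String) : Int × Int :=
  ((((PySem.List.pyGet? ((PySem.Str.split? p ",").getD []) 0).bind PySem.Int.ofStr?).getD 0),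
   (((PySem.List.pyGet? ((PySem.Str.split? p ",").getD []) 1).bind PySem.Int.ofStr?).getD 0))

def pvParseLine (line : String) : String × List (Int × Int) :=
  let parts := PySem.Str.split₀ line
  (((PySem.List.pyGet? parts 0).getD ""),
   (PySem.List.slice parts (some 1) none).map pvParsePair)

-- _ALL = [_parse_line(_line) for _line in _TABLE]
def pvALL : List (String × (List (Int × Int))) := pvTABLE.map pvParseLine

-- the import-time grouping loop: _GROUPS.setdefault(_pair[0][:3], []).append(_pair),
-- i.e. d[k] = d.get(k, []) + [_pair]  →  Dict.modify
def pvGROUPS : PySem.Dict String (List (String × (List (Int × Int)))) :=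
  pvALL.foldl
    (fun d pair => d.modify (PySem.Str.slice pair.1 none (some 3)) [] (· ++ [pair]))
    PySem.Dict.empty

def pvTOKEN_TO_PREFIX : PySem.Dict String String :=
  PySem.Dict.mk [("3", "tri"), ("4", "tet"), ("5", "pen"), ("6", "hex")]

def shapes_for_class_alt (choice_token : String) : List (String × (List (Int × Int))) :=
  let token := PySem.Str.lower choice_token
  match pvTOKEN_TO_PREFIX.get? token with
  | none => pvALL
  | some p => pvGROUPS.getD p []

-- ===== PRECONDITION & SPEC =====
def Spec_shapes_for_class (choice_token : String) (out : List (String × (List (Int × Int)))) : Prop := out = shapes_for_class_alt choice_token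
instance (choice_token : String) (out : List (String × (List (Int × Int)))) : Decidable (Spec_shapes_for_class choice_token out) := by unfold Spec_shapes_for_class; infer_instance

-- ===== CLAIM =====
def Claim_equal_shapes_for_class : Prop := ∀ (choice_token : String), Dom_shapes_for_class choice_token → Spec_shapes_for_class choice_token (shapes_for_class choice_token)

-- ===== LEMMAS AND PROOFS =====
-- filter-then-map over keys = map-then-filter on the first component
theorem pv_filter_map_comm (l : List String) (f : String → String × List (Int × Int))
    (p : String → Bool) (hf : ∀ k, (f k).1 = k) :
    (l.filter p).map f = (l.map f).filter (fun pr => p pr.1) := by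
  induction l with
  | nil => rfl
  | cons a t ih =>
      simp only [List.map_cons, List.filter_cons, hf]
      by_cases h : p a
      · simp [h, ih]
      · simp [h, ih]

-- A's comprehension over keys is just the items list (keys of the literal dict are distinct)
set_option maxRecDepth 40000 in
theorem pv_keys_map_eq_items :
    (pvSAMPLE.keys).map (fun name => (name, pvSAMPLE.getD name [])) = pvSAMPLE.items :=
  (PySem.Dict.items_eq_map_keys pvSAMPLE (by decide) []).symm

-- the import-time parse of pvTABLE is a closed computation; evaluate it once to a literal
set_option maxRecDepth 100000 in
set_option maxHeartbeats 1000000 in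
theorem pvALL_eq : pvALL =
  [("tri-I", [(0, 0), (1, 0), (2, 0)]),
    ("tri-L", [(0, 0), (0, 1), (1, 1)]),
    ("tet-I", [(0, 0), (0, 1), (0, 2), (0, 3)]),
    ("tet-L", [(0, 0), (0, 1), (0, 2), (1, 2)]),
    ("tet-O", [(0, 0), (1, 0), (0, 1), (1, 1)]),
    ("tet-S", [(1, 0), (2, 0), (0, 1), (1, 1)]),
    ("tet-T", [(0, 1), (1, 1), (2, 1), (1, 0)]),
    ("pen-F", [(0, 1), (1, 0), (1, 1), (1, 2), (2, 2)]),
    ("pen-I", [(0, 0), (0, 1), (0, 2), (0, 3), (0, 4)]),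
    ("pen-L", [(0, 0), (0, 1), (0, 2), (0, 3), (1, 0)]),
    ("pen-N", [(0, 0), (0, 1), (1, 1), (1, 2), (1, 3)]),
    ("pen-P", [(0, 0), (1, 0), (0, 1), (1, 1), (0, 2)]),
    ("pen-T", [(0, 2), (1, 2), (2, 2), (1, 0), (1, 1)]),
    ("pen-U", [(0, 0), (0, 1), (1, 0), (2, 0), (2, 1)]),
    ("pen-V", [(0, 0), (0, 1), (0, 2), (1, 0), (2, 0)]),
    ("pen-W", [(0, 1), (0, 2), (1, 0), (1, 1), (2, 0)]),
    ("pen-X", [(0, 1), (1, 0), (1, 1), (1, 2), (2, 1)]),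
    ("pen-Y", [(0, 2), (1, 0), (1, 1), (1, 2), (1, 3)]),
    ("pen-Z", [(0, 2), (1, 0), (1, 1), (1, 2), (2, 0)]),
    ("hex-01", [(0, 0), (0, 1), (0, 2), (0, 3), (0, 4), (0, 5)]),
    ("hex-02", [(0, 0), (0, 1), (1, 0), (1, 1), (2, 0), (2, 1)]),
    ("hex-03", [(0, 0), (1, 0), (2, 0), (3, 0), (4, 0), (4, 1)]),
    ("hex-04", [(0, 0), (1, 0), (2, 0), (2, 1), (3, 0), (4, 0)]),
    ("hex-05", [(0, 1), (1, 1), (2, 1), (3, 0), (3, 1), (4, 0)]),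
    ("hex-06", [(0, 1), (1, 1), (2, 0), (2, 1), (3, 0), (4, 0)]),
    ("hex-07", [(0, 0), (1, 0), (2, 0), (3, 0), (3, 1), (4, 0)]),
    ("hex-08", [(0, 0), (0, 1), (1, 0), (1, 1), (2, 1), (3, 1)]),
    ("hex-09", [(0, 0), (0, 1), (1, 0), (2, 0), (3, 0), (3, 1)]),
    ("hex-10", [(0, 1), (1, 0), (1, 1), (2, 0), (3, 0), (3, 1)]),
    ("hex-11", [(0, 1), (1, 0), (1, 1), (2, 0), (2, 1), (3, 0)]),
    ("hex-12", [(0, 0), (1, 0), (1, 1), (2, 0), (2, 1), (3, 0)]),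
    ("hex-13", [(0, 0), (0, 1), (1, 0), (2, 0), (2, 1), (3, 0)]),
    ("hex-14", [(0, 0), (1, 0), (2, 0), (2, 1), (2, 2), (3, 1)]),
    ("hex-15", [(0, 0), (1, 0), (1, 1), (1, 2), (2, 1), (2, 2)]),
    ("hex-16", [(0, 1), (0, 2), (1, 0), (1, 1), (2, 1), (2, 2)]),
    ("hex-17", [(0, 0), (0, 1), (1, 0), (2, 0), (2, 1), (2, 2)]),
    ("hex-18", [(0, 1), (0, 2), (1, 0), (1, 1), (1, 2), (2, 2)]),
    ("hex-19", [(0, 1), (1, 0), (1, 1), (1, 2), (2, 0), (2, 1)]),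
    ("hex-20", [(0, 0), (0, 1), (0, 2), (1, 1), (2, 1), (2, 2)]),
    ("hex-21", [(0, 0), (1, 0), (1, 1), (2, 0), (2, 1), (2, 2)]),
    ("hex-22", [(0, 0), (1, 0), (1, 1), (2, 1), (2, 2), (3, 1)]),
    ("hex-23", [(0, 1), (1, 1), (1, 2), (2, 0), (2, 1), (3, 1)]),
    ("hex-24", [(0, 1), (0, 2), (1, 1), (2, 1), (3, 0), (3, 1)]),
    ("hex-25", [(0, 1), (1, 1), (2, 0), (2, 1), (2, 2), (3, 2)]),
    ("hex-26", [(0, 2), (1, 2), (2, 1), (2, 2), (3, 0), (3, 1)]),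
    ("hex-27", [(0, 2), (1, 1), (1, 2), (2, 0), (2, 1), (3, 0)]),
    ("hex-28", [(0, 2), (1, 0), (1, 1), (1, 2), (2, 0), (3, 0)]),
    ("hex-29", [(0, 2), (1, 2), (2, 0), (2, 1), (2, 2), (3, 2)]),
    ("hex-30", [(0, 1), (0, 2), (1, 1), (2, 0), (2, 1), (3, 0)]),
    ("hex-31", [(0, 1), (0, 2), (1, 1), (2, 0), (2, 1), (3, 1)]),
    ("hex-32", [(0, 1), (1, 1), (2, 0), (2, 1), (2, 2), (3, 1)]),
    ("hex-33", [(0, 1), (1, 1), (2, 0), (2, 1), (3, 1), (3, 2)]),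
    ("hex-34", [(0, 0), (0, 1), (0, 2), (1, 0), (2, 0), (3, 0)]),
    ("hex-35", [(0, 1), (1, 1), (2, 1), (3, 0), (3, 1), (3, 2)])] := by decide

-- … and so is the grouping fold over that literal
set_option maxRecDepth 100000 in
set_option maxHeartbeats 1000000 in
theorem pvGROUPS_eq : pvGROUPS =
  PySem.Dict.mk [("tri", [("tri-I", [(0, 0), (1, 0), (2, 0)]),
      ("tri-L", [(0, 0), (0, 1), (1, 1)])]),
    ("tet", [("tet-I", [(0, 0), (0, 1), (0, 2), (0, 3)]),
      ("tet-L", [(0, 0), (0, 1), (0, 2), (1, 2)]),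
      ("tet-O", [(0, 0), (1, 0), (0, 1), (1, 1)]),
      ("tet-S", [(1, 0), (2, 0), (0, 1), (1, 1)]),
      ("tet-T", [(0, 1), (1, 1), (2, 1), (1, 0)])]),
    ("pen", [("pen-F", [(0, 1), (1, 0), (1, 1), (1, 2), (2, 2)]),
      ("pen-I", [(0, 0), (0, 1), (0, 2), (0, 3), (0, 4)]),
      ("pen-L", [(0, 0), (0, 1), (0, 2), (0, 3), (1, 0)]),
      ("pen-N", [(0, 0), (0, 1), (1, 1), (1, 2), (1, 3)]),
      ("pen-P", [(0, 0), (1, 0), (0, 1), (1, 1), (0, 2)]),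
      ("pen-T", [(0, 2), (1, 2), (2, 2), (1, 0), (1, 1)]),
      ("pen-U", [(0, 0), (0, 1), (1, 0), (2, 0), (2, 1)]),
      ("pen-V", [(0, 0), (0, 1), (0, 2), (1, 0), (2, 0)]),
      ("pen-W", [(0, 1), (0, 2), (1, 0), (1, 1), (2, 0)]),
      ("pen-X", [(0, 1), (1, 0), (1, 1), (1, 2), (2, 1)]),
      ("pen-Y", [(0, 2), (1, 0), (1, 1), (1, 2), (1, 3)]),
      ("pen-Z", [(0, 2), (1, 0), (1, 1), (1, 2), (2, 0)])]),
    ("hex", [("hex-01", [(0, 0), (0, 1), (0, 2), (0, 3), (0, 4), (0, 5)]),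
      ("hex-02", [(0, 0), (0, 1), (1, 0), (1, 1), (2, 0), (2, 1)]),
      ("hex-03", [(0, 0), (1, 0), (2, 0), (3, 0), (4, 0), (4, 1)]),
      ("hex-04", [(0, 0), (1, 0), (2, 0), (2, 1), (3, 0), (4, 0)]),
      ("hex-05", [(0, 1), (1, 1), (2, 1), (3, 0), (3, 1), (4, 0)]),
      ("hex-06", [(0, 1), (1, 1), (2, 0), (2, 1), (3, 0), (4, 0)]),
      ("hex-07", [(0, 0), (1, 0), (2, 0), (3, 0), (3, 1), (4, 0)]),
      ("hex-08", [(0, 0), (0, 1), (1, 0), (1, 1), (2, 1), (3, 1)]),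
      ("hex-09", [(0, 0), (0, 1), (1, 0), (2, 0), (3, 0), (3, 1)]),
      ("hex-10", [(0, 1), (1, 0), (1, 1), (2, 0), (3, 0), (3, 1)]),
      ("hex-11", [(0, 1), (1, 0), (1, 1), (2, 0), (2, 1), (3, 0)]),
      ("hex-12", [(0, 0), (1, 0), (1, 1), (2, 0), (2, 1), (3, 0)]),
      ("hex-13", [(0, 0), (0, 1), (1, 0), (2, 0), (2, 1), (3, 0)]),
      ("hex-14", [(0, 0), (1, 0), (2, 0), (2, 1), (2, 2), (3, 1)]),
      ("hex-15", [(0, 0), (1, 0), (1, 1), (1, 2), (2, 1), (2, 2)]),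
      ("hex-16", [(0, 1), (0, 2), (1, 0), (1, 1), (2, 1), (2, 2)]),
      ("hex-17", [(0, 0), (0, 1), (1, 0), (2, 0), (2, 1), (2, 2)]),
      ("hex-18", [(0, 1), (0, 2), (1, 0), (1, 1), (1, 2), (2, 2)]),
      ("hex-19", [(0, 1), (1, 0), (1, 1), (1, 2), (2, 0), (2, 1)]),
      ("hex-20", [(0, 0), (0, 1), (0, 2), (1, 1), (2, 1), (2, 2)]),
      ("hex-21", [(0, 0), (1, 0), (1, 1), (2, 0), (2, 1), (2, 2)]),
      ("hex-22", [(0, 0), (1, 0), (1, 1), (2, 1), (2, 2), (3, 1)]),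
      ("hex-23", [(0, 1), (1, 1), (1, 2), (2, 0), (2, 1), (3, 1)]),
      ("hex-24", [(0, 1), (0, 2), (1, 1), (2, 1), (3, 0), (3, 1)]),
      ("hex-25", [(0, 1), (1, 1), (2, 0), (2, 1), (2, 2), (3, 2)]),
      ("hex-26", [(0, 2), (1, 2), (2, 1), (2, 2), (3, 0), (3, 1)]),
      ("hex-27", [(0, 2), (1, 1), (1, 2), (2, 0), (2, 1), (3, 0)]),
      ("hex-28", [(0, 2), (1, 0), (1, 1), (1, 2), (2, 0), (3, 0)]),
      ("hex-29", [(0, 2), (1, 2), (2, 0), (2, 1), (2, 2), (3, 2)]),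
      ("hex-30", [(0, 1), (0, 2), (1, 1), (2, 0), (2, 1), (3, 0)]),
      ("hex-31", [(0, 1), (0, 2), (1, 1), (2, 0), (2, 1), (3, 1)]),
      ("hex-32", [(0, 1), (1, 1), (2, 0), (2, 1), (2, 2), (3, 1)]),
      ("hex-33", [(0, 1), (1, 1), (2, 0), (2, 1), (3, 1), (3, 2)]),
      ("hex-34", [(0, 0), (0, 1), (0, 2), (1, 0), (2, 0), (3, 0)]),
      ("hex-35", [(0, 1), (1, 1), (2, 1), (3, 0), (3, 1), (3, 2)])])] := by
  unfold pvGROUPS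
  rw [pvALL_eq]
  decide

-- ===== VERDICT =====
set_option maxRecDepth 100000 in
set_option maxHeartbeats 1000000 in
theorem shapes_for_class_spec : Claim_equal_shapes_for_class := by
  intro ct _
  unfold Spec_shapes_for_class shapes_for_class shapes_for_class_alt
  by_cases h3 : PySem.Str.lower ct = "3"
  · simp only [h3, String.reduceEq, reduceIte]
    rw [pv_filter_map_comm pvSAMPLE.keys (fun name => (name, pvSAMPLE.getD name []))
        (fun name => PySem.Str.startswith name "tri") (fun k => rfl), pv_keys_map_eq_items,
        pvGROUPS_eq]
    decide
  by_cases h4 : PySem.Str.lower ct = "4"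
  · simp only [h4, String.reduceEq, reduceIte]
    rw [pv_filter_map_comm pvSAMPLE.keys (fun name => (name, pvSAMPLE.getD name []))
        (fun name => PySem.Str.startswith name "tet") (fun k => rfl), pv_keys_map_eq_items,
        pvGROUPS_eq]
    decide
  by_cases h5 : PySem.Str.lower ct = "5"
  · simp only [h5, String.reduceEq, reduceIte]
    rw [pv_filter_map_comm pvSAMPLE.keys (fun name => (name, pvSAMPLE.getD name []))
        (fun name => PySem.Str.startswith name "pen") (fun k => rfl), pv_keys_map_eq_items,
        pvGROUPS_eq]
    decide
  by_cases h6 : PySem.Str.lower ct = "6"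
  · simp only [h6, String.reduceEq, reduceIte]
    rw [pv_filter_map_comm pvSAMPLE.keys (fun name => (name, pvSAMPLE.getD name []))
        (fun name => PySem.Str.startswith name "hex") (fun k => rfl), pv_keys_map_eq_items,
        pvGROUPS_eq]
    decide
  · simp only [if_neg h3, if_neg h4, if_neg h5, if_neg h6]
    have hg : pvTOKEN_TO_PREFIX.get? (PySem.Str.lower ct) = none := by
      simp only [pvTOKEN_TO_PREFIX, PySem.Dict.get?]
      simp [h3, h4, h5, h6, Ne.symm, beq_iff_eq]
    simp only [hg]
    rw [pv_keys_map_eq_items, pvALL_eq]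
    decide
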